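-- pv_equiv track=rewrite | github.com/Hulyamr13/hackerrank | ChiefHopper.py | chiefHopper
-- ===== SOURCE A (Python) =====
-- def chiefHopper(arr):
--     # Write your code here
--     high = low = 0
--
--     for i in arr:
--         if i > high:
--             high = i
--         if i < low:
--             low = i
--
--     def tester(x, arr):
--         energy = x
--         for height in arr:
--             if height > energy:
--                 energy -= (height - energy)
--                 if energy < 0:
--                     return False
--             else:
--                 energy += (energy - height)
--         return True
--
--     cont = True
--     i = (high + low) // 2
--     dic = {}
--
--     while cont:
--         if dic.get(i - 1, tester(i - 1, arr)):
--             high = i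
--             i = (high + low) // 2
--         else:
--             if dic.get(i, tester(i, arr)):
--                 cont = False
--             else:
--                 low = i
--                 i = ((i + high + 1) // 2)
--                 if i == 0:
--                     i = 1
--
--     return i
-- ===== SOURCE B (Python) =====
-- def chiefHopper(arr):
--     # Backward pass: the minimal energy needed before a height h, given that
--     # need units must remain afterwards, is max(min(h, ceil(h/2)), ceil((need+h)/2)).
--     # (min(h, ceil(h/2)) is the smallest e with not(h > e and 2*e - h < 0).)
--     need = None
--     for h in reversed(arr):
--         lo = min(h, (h + 1) // 2)
--         if need is None:
--             need = lo
--         else: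
--             need = max(lo, (need + h + 1) // 2)
--     return need
-- ===== Notes on version B (the rewrite author's own statement) =====
-- stated objective: faster
-- what changed: Replaces A's binary search over the energy range (each probe re-simulating the whole jump sequence, with exponentially growing big-int energies) by a single backward pass computing the minimal required energy in O(n); Pre_ excludes only the empty list, on which A loops forever.
-- outside the precondition, e.g. on chiefHopper([]): A does not finish within the time limit, B returns None
import Mathlib
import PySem

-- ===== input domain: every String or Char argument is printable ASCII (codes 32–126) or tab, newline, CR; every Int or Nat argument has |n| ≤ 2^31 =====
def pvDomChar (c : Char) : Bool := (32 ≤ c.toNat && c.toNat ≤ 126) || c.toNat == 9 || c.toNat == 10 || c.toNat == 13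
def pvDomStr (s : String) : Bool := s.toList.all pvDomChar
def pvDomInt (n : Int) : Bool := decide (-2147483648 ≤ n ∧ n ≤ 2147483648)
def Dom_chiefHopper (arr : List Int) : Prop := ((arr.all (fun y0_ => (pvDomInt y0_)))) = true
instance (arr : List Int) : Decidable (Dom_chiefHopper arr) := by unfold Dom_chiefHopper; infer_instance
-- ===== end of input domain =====

-- B replaces A's binary search (each probe re-simulating all jumps) by one backward
-- pass; equivalence is over the return value on non-empty lists (A loops forever on []).

-- ===== PORT A =====
-- A's inner helper tester(x, arr)
def testerA (energy : Int) (arr : List Int) : Bool :=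
  match arr with
  | [] => true
  | h :: t =>
    if h > energy then
      let e := energy - (h - energy)
      if e < 0 then false else testerA e t
    else testerA (energy + (energy - h)) t

-- the high/low scan of A's first for loop
def hlStep (p : Int × Int) (x : Int) : Int × Int :=
  (if x > p.1 then x else p.1, if x < p.2 then x else p.2)

-- A's while loop, totalised with fuel; the fuel chiefHopper supplies is proved
-- below (loopAF_fuel_enough) never to run out on non-empty input.
-- (dic in A is never written to, so dic.get(k, tester(k, arr)) is always
-- tester(k, arr); it is inlined here.)
def loopAF (arr : List Int) (fuel : Nat) (low high i : Int) : Int :=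
  match fuel with
  | 0 => i
  | fuel + 1 =>
    if testerA (i - 1) arr then
      loopAF arr fuel low i (PySem.Int.floordiv (i + low) 2)
    else if testerA i arr then i
    else
      loopAF arr fuel i high
        (if PySem.Int.floordiv (i + high + 1) 2 = 0 then 1
         else PySem.Int.floordiv (i + high + 1) 2)

def chiefHopper (arr : List Int) : Int :=
  if arr = [] then 0   -- A loops forever on []; excluded by Pre_chiefHopper
  else
    loopAF arr
      ((2 * ((arr.foldl hlStep (0, 0)).1 - (arr.foldl hlStep (0, 0)).2)).toNat + 8)
      (arr.foldl hlStep (0, 0)).2 (arr.foldl hlStep (0, 0)).1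
      (PySem.Int.floordiv ((arr.foldl hlStep (0, 0)).1 + (arr.foldl hlStep (0, 0)).2) 2)

-- ===== PORT B =====
-- one step of Source B's backward pass (need is None before the first element)
def stepB (need : Option Int) (h : Int) : Option Int :=
  match need with
  | none => some (min h (PySem.Int.floordiv (h + 1) 2))
  | some n => some (max (min h (PySem.Int.floordiv (h + 1) 2))
      (PySem.Int.floordiv (n + h + 1) 2))

def chiefHopper_alt (arr : List Int) : Int :=
  (arr.reverse.foldl stepB none).getD 0

-- ===== PRECONDITION & SPEC =====
-- Pre_ excludes only the empty list: there A's while loop never terminates.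
def Pre_chiefHopper (arr : List Int) : Prop := arr ≠ []
instance (arr : List Int) : Decidable (Pre_chiefHopper arr) := by
  unfold Pre_chiefHopper; infer_instance
def pvWitness_chiefHopper : List Int := [2, 3, 1]

def Spec_chiefHopper (arr : List Int) (out : Int) : Prop := out = chiefHopper_alt arr
instance (arr : List Int) (out : Int) : Decidable (Spec_chiefHopper arr out) := by
  unfold Spec_chiefHopper; infer_instance

-- ===== CLAIM (what is proved, stated in full; the proofs are below) =====
def Claim_equal_chiefHopper : Prop := ∀ (arr : List Int), Dom_chiefHopper arr →
  Pre_chiefHopper arr → Spec_chiefHopper arr (chiefHopper arr)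

-- ===== LEMMAS AND PROOFS =====

-- the least energy testerA accepts (0 on []); B computes it, and A's binary
-- search returns it
def minNeed : List Int → Int
  | [] => 0
  | [h] => min h (PySem.Int.floordiv (h + 1) 2)
  | h :: t => max (min h (PySem.Int.floordiv (h + 1) 2))
      (PySem.Int.floordiv (minNeed t + h + 1) 2)

-- one step of testerA in normalised form
theorem testerA_cons (x h : Int) (t : List Int) :
    testerA x (h :: t) = if h > x ∧ 2 * x - h < 0 then false else testerA (2 * x - h) t := by
  simp only [testerA]
  split_ifs with h1 h2 h3 h3 <;> first
  | rfl
  | omega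
  | (congr 1; omega)

-- characterisation of tester: it accepts exactly the energies ≥ minNeed
theorem testerA_iff (arr : List Int) (hne : arr ≠ []) (x : Int) :
    (testerA x arr = true ↔ minNeed arr ≤ x) := by
  induction arr generalizing x with
  | nil => exact absurd rfl hne
  | cons h t ih =>
    cases t with
    | nil =>
      rw [testerA_cons]
      simp only [minNeed, testerA]
      rw [PySem.Int.floordiv_eq_ediv_of_pos (by norm_num)]
      split_ifs <;> simp <;> omega
    | cons h2 t2 =>
      rw [testerA_cons]
      have ih' := ih (by simp) (2 * x - h)
      simp only [minNeed]
      rw [PySem.Int.floordiv_eq_ediv_of_pos (by norm_num),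
          PySem.Int.floordiv_eq_ediv_of_pos (by norm_num)]
      split_ifs with hf
      · simp only [false_iff]
        omega
      · rw [ih']
        omega

-- loop invariant of A's while loop (minNeed arr is the search target)
def InvA (arr : List Int) (low high i : Int) : Prop :=
  low ≤ minNeed arr ∧ minNeed arr ≤ high ∧ low ≤ i ∧
    (i ≤ high ∨ (low = -1 ∧ high = 0 ∧ i = 1 ∧ minNeed arr = 0))

-- termination measure of A's while loop
def muA (arr : List Int) (low high i : Int) : Nat :=
  (2 * (high - low) + (if i = low then 2 else 0) + (if i = high then 1 else 0) +
    (if i = minNeed arr then 0 else 3)).toNat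

theorem inv_step1 (arr : List Int) (hne : arr ≠ []) {low high i : Int}
    (hinv : InvA arr low high i) (hc1 : testerA (i - 1) arr = true) :
    InvA arr low i (PySem.Int.floordiv (i + low) 2) := by
  obtain ⟨h1, h2, h3, h4⟩ := hinv
  rw [testerA_iff arr hne] at hc1
  unfold InvA
  rw [PySem.Int.floordiv_eq_ediv_of_pos (by norm_num)]
  omega

theorem dec_step1 (arr : List Int) (hne : arr ≠ []) {low high i : Int}
    (hinv : InvA arr low high i) (hc1 : testerA (i - 1) arr = true) :
    muA arr low i (PySem.Int.floordiv (i + low) 2) < muA arr low high i := by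
  obtain ⟨h1, h2, h3, h4⟩ := hinv
  rw [testerA_iff arr hne] at hc1
  unfold muA
  rw [PySem.Int.floordiv_eq_ediv_of_pos (by norm_num)]
  split_ifs <;> omega

theorem inv_step3 (arr : List Int) (hne : arr ≠ []) {low high i : Int}
    (hinv : InvA arr low high i) (_hc1 : ¬ testerA (i - 1) arr = true)
    (hc2 : ¬ testerA i arr = true) :
    InvA arr i high
      (if PySem.Int.floordiv (i + high + 1) 2 = 0 then 1
       else PySem.Int.floordiv (i + high + 1) 2) := by
  obtain ⟨h1, h2, h3, h4⟩ := hinv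
  rw [testerA_iff arr hne] at hc2
  unfold InvA
  rw [PySem.Int.floordiv_eq_ediv_of_pos (by norm_num)]
  split_ifs <;> omega

theorem dec_step3 (arr : List Int) (hne : arr ≠ []) {low high i : Int}
    (hinv : InvA arr low high i) (_hc1 : ¬ testerA (i - 1) arr = true)
    (hc2 : ¬ testerA i arr = true) :
    muA arr i high
      (if PySem.Int.floordiv (i + high + 1) 2 = 0 then 1
       else PySem.Int.floordiv (i + high + 1) 2) < muA arr low high i := by
  obtain ⟨h1, h2, h3, h4⟩ := hinv
  rw [testerA_iff arr hne] at hc2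
  unfold muA
  rw [PySem.Int.floordiv_eq_ediv_of_pos (by norm_num)]
  split_ifs <;> omega

-- with enough fuel, A's loop returns the least tester-accepted energy
theorem loopAF_fuel_enough (arr : List Int) (hne : arr ≠ []) :
    ∀ (fuel : Nat) (low high i : Int), InvA arr low high i →
      muA arr low high i < fuel → loopAF arr fuel low high i = minNeed arr := by
  intro fuel
  induction fuel with
  | zero => intro low high i _ hμ; exact absurd hμ (Nat.not_lt_zero _)
  | succ fuel ih =>
    intro low high i hinv hμ
    by_cases hc1 : testerA (i - 1) arr = true
    · have hd := dec_step1 arr hne hinv hc1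
      simp only [loopAF, hc1, if_true]
      exact ih _ _ _ (inv_step1 arr hne hinv hc1) (by omega)
    · by_cases hc2 : testerA i arr = true
      · simp only [loopAF, hc1, hc2, Bool.false_eq_true, if_true, if_false]
        rw [testerA_iff arr hne] at hc1 hc2
        omega
      · have hd := dec_step3 arr hne hinv hc1 hc2
        simp only [loopAF, hc1, hc2, Bool.false_eq_true, if_false]
        exact ih _ _ _ (inv_step3 arr hne hinv hc1 hc2) (by omega)

-- the high/low scan bounds every element (and 0)
theorem hlStep_spec (arr : List Int) : ∀ p : Int × Int,
    p.1 ≤ (arr.foldl hlStep p).1 ∧ (arr.foldl hlStep p).2 ≤ p.2 ∧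
    ∀ x ∈ arr, x ≤ (arr.foldl hlStep p).1 ∧ (arr.foldl hlStep p).2 ≤ x := by
  induction arr with
  | nil => intro p; simp
  | cons y t ih =>
    intro p
    obtain ⟨a1, a2, a3⟩ := ih (hlStep p y)
    refine ⟨?_, ?_, ?_⟩
    · simp only [List.foldl_cons]; have : p.1 ≤ (hlStep p y).1 := by
        simp only [hlStep]; split_ifs <;> omega
      omega
    · simp only [List.foldl_cons]; have : (hlStep p y).2 ≤ p.2 := by
        simp only [hlStep]; split_ifs <;> omega
      omega
    · intro x hx
      rcases List.mem_cons.mp hx with rfl | hx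
      · constructor
        · simp only [List.foldl_cons]
          have : x ≤ (hlStep p x).1 := by simp only [hlStep]; split_ifs <;> omega
          omega
        · simp only [List.foldl_cons]
          have : (hlStep p x).2 ≤ x := by simp only [hlStep]; split_ifs <;> omega
          omega
      · simpa using a3 x hx

-- minNeed lies between any bounds enclosing 0 and all elements
theorem minNeed_bounds (arr : List Int) (hne : arr ≠ []) (lo hi : Int)
    (hlo : lo ≤ 0) (hmem : ∀ x ∈ arr, lo ≤ x ∧ x ≤ hi) :
    lo ≤ minNeed arr ∧ minNeed arr ≤ hi := by
  induction arr with
  | nil => exact absurd rfl hne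
  | cons h t ih =>
    have hh := hmem h (by simp)
    cases t with
    | nil =>
      simp only [minNeed]
      rw [PySem.Int.floordiv_eq_ediv_of_pos (by norm_num)]
      omega
    | cons h2 t2 =>
      have iht := ih (by simp) (fun x hx => hmem x (List.mem_cons_of_mem _ hx))
      simp only [minNeed]
      rw [PySem.Int.floordiv_eq_ediv_of_pos (by norm_num),
          PySem.Int.floordiv_eq_ediv_of_pos (by norm_num)]
      omega

-- B's backward pass computes minNeed
theorem foldB_eq (arr : List Int) (hne : arr ≠ []) :
    arr.reverse.foldl stepB none = some (minNeed arr) := by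
  induction arr with
  | nil => exact absurd rfl hne
  | cons h t ih =>
    rw [List.reverse_cons, List.foldl_append]
    cases t with
    | nil => simp [stepB, minNeed]
    | cons h2 t2 =>
      rw [ih (by simp)]
      simp [stepB, minNeed]

-- ===== VERDICT (by name: the statement is the Claim_ definition above) =====
theorem chiefHopper_spec : Claim_equal_chiefHopper := by
  intro arr _ hpre
  unfold Spec_chiefHopper chiefHopper chiefHopper_alt
  rw [if_neg hpre, foldB_eq arr hpre]
  obtain ⟨a1, a2, a3⟩ := hlStep_spec arr (0, 0)
  have a1' : (0 : Int) ≤ (arr.foldl hlStep (0, 0)).1 := by simpa using a1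
  have a2' : (arr.foldl hlStep (0, 0)).2 ≤ 0 := by simpa using a2
  have hb := minNeed_bounds arr hpre (arr.foldl hlStep (0, 0)).2 (arr.foldl hlStep (0, 0)).1
    a2' (fun x hx => ⟨(a3 x hx).2, (a3 x hx).1⟩)
  have hinv : InvA arr (arr.foldl hlStep (0, 0)).2 (arr.foldl hlStep (0, 0)).1
      (PySem.Int.floordiv ((arr.foldl hlStep (0, 0)).1 + (arr.foldl hlStep (0, 0)).2) 2) := by
    unfold InvA
    rw [PySem.Int.floordiv_eq_ediv_of_pos (by norm_num)]
    omega
  rw [loopAF_fuel_enough arr hpre _ _ _ _ hinv ?_]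
  · rfl
  · unfold muA
    split_ifs <;> omega
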